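-- pv_equiv track=rewrite | github.com/ElchaabiMohamed/InferCode_SVM | NC-5690-python-files/program_213.py | prononcable
-- ===== SOURCE A (Python) =====
-- def prononcable(mot):
--     res = True
--     liste_voyelles = ["a","e","i","o","u","y"]
--     nb_ = 0
--     last = ""
--     for lettre in mot:
--         if lettre.lower() in liste_voyelles:
--             if last == "syl":
--         	    nb_ = 0
--             last = "voy"
--             nb_ += 1
--         else:
--             if last == "voy":
--         	    nb_ = 0
--             last = "syl"
--             nb_ += 1
--
--         if nb_ > 3:
--             res = False
--     return res
-- ===== SOURCE B (Python) =====
-- def prononcable(mot):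
--     vowels = {"a", "e", "i", "o", "u", "y"}
--     s = ''.join('V' if c.lower() in vowels else 'C' for c in mot)
--     return 'VVVV' not in s and 'CCCC' not in s
-- ===== Notes on version B (the rewrite author's own statement) =====
-- stated objective: simpler
-- what changed: Replaces the manual run-counting state machine (res/nb_/last) by building a vowel/consonant classification string and testing it for a four-long same-class substring.
import Mathlib
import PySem

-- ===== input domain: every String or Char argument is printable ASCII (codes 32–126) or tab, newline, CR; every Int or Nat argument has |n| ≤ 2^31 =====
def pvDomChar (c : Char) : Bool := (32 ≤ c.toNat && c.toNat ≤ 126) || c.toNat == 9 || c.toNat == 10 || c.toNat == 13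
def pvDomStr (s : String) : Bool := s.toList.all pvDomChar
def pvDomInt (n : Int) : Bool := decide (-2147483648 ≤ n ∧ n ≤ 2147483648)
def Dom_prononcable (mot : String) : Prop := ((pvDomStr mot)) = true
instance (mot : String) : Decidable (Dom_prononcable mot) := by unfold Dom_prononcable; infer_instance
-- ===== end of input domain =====

-- B replaces A's manual run-counting state machine by a V/C classification list
-- tested for a four-long same-letter substring; same return value on every input.

-- ===== PORT A =====
-- `lettre.lower() in liste_voyelles` (a one-character string tested against the
-- list of one-character vowel strings); shared by both ports since both Pythons
-- perform exactly this membership test.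
def pvIsVow (lettre : Char) : Bool :=
  ["a", "e", "i", "o", "u", "y"].contains (PySem.Str.lower (String.mk [lettre]))

-- the loop body of A: state (res, nb_, last)
def pronStep (st : Bool × Int × String) (lettre : Char) : Bool × Int × String :=
  let res := st.1
  let nb := st.2.1
  let last := st.2.2
  if pvIsVow lettre then
    let nb := if last == "syl" then 0 else nb
    let last := "voy"
    let nb := nb + 1
    let res := if nb > 3 then false else res
    (res, nb, last)
  else
    let nb := if last == "voy" then 0 else nb
    let last := "syl"
    let nb := nb + 1
    let res := if nb > 3 then false else res
    (res, nb, last)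

def prononcable (mot : String) : Bool :=
  (mot.toList.foldl pronStep (true, 0, "")).1

-- ===== PORT B =====
-- s = ''.join('V' if c.lower() in vowels else 'C' for c in mot)
-- return 'VVVV' not in s and 'CCCC' not in s
def prononcable_alt (mot : String) : Bool :=
  let s : List Char := mot.toList.map (fun c => if pvIsVow c then 'V' else 'C')
  !decide (['V', 'V', 'V', 'V'] <:+: s) && !decide (['C', 'C', 'C', 'C'] <:+: s)

-- ===== PRECONDITION & SPEC =====
def Spec_prononcable (mot : String) (out : Bool) : Prop := out = prononcable_alt mot
instance (mot : String) (out : Bool) : Decidable (Spec_prononcable mot out) := by unfold Spec_prononcable; infer_instance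

-- ===== CLAIM (what is proved, stated in full; the proofs are below) =====
def Claim_equal_prononcable : Prop := ∀ (mot : String), Dom_prononcable mot → Spec_prononcable mot (prononcable mot)

-- ===== LEMMAS AND PROOFS =====

-- reference predicate: does the list contain four consecutive equal elements?
def pvHas4 {α : Type} [DecidableEq α] : List α → Bool
  | a :: b :: c :: d :: t => (a == b && b == c && c == d) || pvHas4 (b :: c :: d :: t)
  | _ => false

theorem pvHas4_cons4 {α : Type} [DecidableEq α] (a b c d : α) (t : List α) :
    pvHas4 (a :: b :: c :: d :: t)
      = ((a == b && b == c && c == d) || pvHas4 (b :: c :: d :: t)) := rfl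

theorem pvHas4_cons_of {α : Type} [DecidableEq α] (a : α) (m : List α)
    (h : pvHas4 m = true) : pvHas4 (a :: m) = true := by
  match m with
  | [] => simp [pvHas4] at h
  | [_] => simp [pvHas4] at h
  | [_, _] => simp [pvHas4] at h
  | [_, _, _] => simp [pvHas4] at h
  | b :: c :: d :: e :: t => rw [pvHas4_cons4, h, Bool.or_true]

theorem pvHas4_of_infix {α : Type} [DecidableEq α] (x : α) (s : List α)
    (h : [x, x, x, x] <:+: s) : pvHas4 s = true := by
  obtain ⟨l, r, hs⟩ := h
  induction l generalizing s with
  | nil => subst hs; simp [pvHas4]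
  | cons a l ih =>
      subst hs
      exact pvHas4_cons_of a _ (ih _ rfl)

theorem pvHas4_sound {α : Type} [DecidableEq α] (s : List α)
    (h : pvHas4 s = true) : ∃ x, x ∈ s ∧ [x, x, x, x] <:+: s := by
  induction s using pvHas4.induct with
  | case1 a b c d t ih =>
      rw [pvHas4_cons4] at h
      simp only [Bool.or_eq_true, Bool.and_eq_true, beq_iff_eq] at h
      rcases h with ⟨⟨hab, hbc⟩, hcd⟩ | h
      · refine ⟨a, by simp, [], t, ?_⟩
        simp [hab, hbc, hcd]
      · obtain ⟨x, hx, hinf⟩ := ih h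
        exact ⟨x, by simp [hx], hinf.trans (List.suffix_cons a _).isInfix⟩
  | case2 s h2 =>
      match s, h2 with
      | [], _ => simp [pvHas4] at h
      | [_], _ => simp [pvHas4] at h
      | [_, _], _ => simp [pvHas4] at h
      | [_, _, _], _ => simp [pvHas4] at h
      | a :: b :: c :: d :: t, h2 => exact absurd rfl (h2 a b c d t)

-- pvHas4 is preserved by mapping through an equality-reflecting function
theorem pvHas4_map (g : Bool → Char) (hg : ∀ x y, (g x == g y) = (x == y))
    (l : List Bool) : pvHas4 (l.map g) = pvHas4 l := by
  induction l using pvHas4.induct with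
  | case1 a b c d t ih =>
      simp only [List.map_cons] at ih ⊢
      rw [pvHas4_cons4, pvHas4_cons4, hg, hg, hg, ih]
  | case2 s h2 =>
      match s, h2 with
      | [], _ => rfl
      | [_], _ => rfl
      | [_, _], _ => rfl
      | [_, _, _], _ => rfl
      | a :: b :: c :: d :: t, h2 => exact absurd rfl (h2 a b c d t)

-- a short run of b before a differing element v does not affect pvHas4
theorem pvHas4_skip {α : Type} [DecidableEq α] (b v : α) (hbv : (b == v) = false)
    (n : Nat) (hn : n ≤ 3) (xs : List α) :
    pvHas4 (List.replicate n b ++ v :: xs) = pvHas4 (v :: xs) := by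
  interval_cases n <;>
    match xs with
    | [] => first | rfl | simp [pvHas4, List.replicate, hbv]
    | [x1] => first | rfl | simp [pvHas4, List.replicate, hbv]
    | [x1, x2] => first | rfl | simp [pvHas4, List.replicate, hbv]
    | x1 :: x2 :: x3 :: xs' => first | rfl | simp [pvHas4, List.replicate, hbv]

-- a full four-run at the front makes pvHas4 true
theorem pvHas4_four {α : Type} [DecidableEq α] (b : α) (xs : List α) :
    pvHas4 (List.replicate 3 b ++ b :: xs) = true := by
  simp [pvHas4, List.replicate]

-- once res is False it stays False
theorem pronFold_false (l : List Char) (nb : Int) (last : String) :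
    (l.foldl pronStep (false, nb, last)).1 = false := by
  induction l generalizing nb last with
  | nil => rfl
  | cons c l ih =>
      simp only [List.foldl_cons, pronStep]
      split_ifs <;> exact ih _ _

-- the run-length state machine computes "no four-long same-class run", given
-- that the already-seen trailing run is n copies of class b with n ≤ 3
theorem pronFold_char (l : List Char) (n : Nat) (b : Bool) (hn : n ≤ 3) :
    (l.foldl pronStep (true, (n : Int), if b then "voy" else "syl")).1
      = !pvHas4 (List.replicate n b ++ l.map pvIsVow) := by
  induction l generalizing n b with
  | nil =>
      interval_cases n <;> cases b <;> rfl
  | cons c l ih =>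
      simp only [List.foldl_cons, pronStep, List.map_cons]
      by_cases hv : pvIsVow c
      · cases b
        · -- last = "syl", current char is a vowel: run resets to 1
          simp only [hv, if_true, Bool.false_eq_true, if_false,
            show (("syl" : String) == "syl") = true by decide, if_true]
          norm_num
          have h := ih 1 true (by omega)
          norm_num at h
          rw [h, pvHas4_skip false true (by decide) n hn (l.map pvIsVow)]
        · -- last = "voy", vowel again: run grows
          simp only [hv, if_true,
            show (("voy" : String) == "syl") = false by decide, Bool.false_eq_true, if_false]
          by_cases h3 : n = 3
          · subst h3
            norm_num
            rw [pronFold_false, pvHas4_four]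
            rfl
          · have hlt : ¬ ((n : Int) + 1 > 3) := by omega
            rw [if_neg hlt,
              show List.replicate n true ++ true :: l.map pvIsVow
                  = List.replicate (n + 1) true ++ l.map pvIsVow by
                rw [List.replicate_succ' (n := n), List.append_assoc]; rfl,
              show ((n : Int) + 1) = ((n + 1 : Nat) : Int) by push_cast; ring]
            have h := ih (n + 1) true (by omega)
            rw [if_pos rfl] at h
            exact h
      · have hv' : pvIsVow c = false := by simp [hv]
        cases b
        · -- last = "syl", consonant again: run grows
          simp only [hv', Bool.false_eq_true, if_false,
            show (("syl" : String) == "voy") = false by decide]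
          by_cases h3 : n = 3
          · subst h3
            norm_num
            rw [pronFold_false, pvHas4_four]
            rfl
          · have hlt : ¬ ((n : Int) + 1 > 3) := by omega
            rw [if_neg hlt,
              show List.replicate n false ++ false :: l.map pvIsVow
                  = List.replicate (n + 1) false ++ l.map pvIsVow by
                rw [List.replicate_succ' (n := n), List.append_assoc]; rfl,
              show ((n : Int) + 1) = ((n + 1 : Nat) : Int) by push_cast; ring]
            have h := ih (n + 1) false (by omega)
            rw [show (if false = true then "voy" else "syl") = "syl" from rfl] at h
            exact h
        · -- last = "voy", consonant: run resets to 1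
          simp only [hv', Bool.false_eq_true, if_false,
            show (("voy" : String) == "voy") = true by decide, if_true]
          norm_num
          have h := ih 1 false (by omega)
          norm_num at h
          rw [h, pvHas4_skip true false (by decide) n hn (l.map pvIsVow)]

theorem prononcable_eq_has4 (mot : String) :
    prononcable mot = !pvHas4 (mot.toList.map pvIsVow) := by
  unfold prononcable
  cases hm : mot.toList with
  | nil => rfl
  | cons c l =>
      simp only [List.foldl_cons, pronStep, List.map_cons]
      by_cases hv : pvIsVow c
      · simp only [hv, if_true,
          show ((("" : String)) == "syl") = false by decide, Bool.false_eq_true, if_false]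
        norm_num
        have h := pronFold_char l 1 true (by omega)
        norm_num at h
        rw [h]
      · have hv' : pvIsVow c = false := by simp [hv]
        simp only [hv', Bool.false_eq_true, if_false,
          show ((("" : String)) == "voy") = false by decide]
        norm_num
        have h := pronFold_char l 1 false (by omega)
        norm_num at h
        rw [h]

theorem prononcable_alt_eq_has4 (mot : String) :
    prononcable_alt mot = !pvHas4 (mot.toList.map pvIsVow) := by
  unfold prononcable_alt
  set t := mot.toList.map pvIsVow with ht
  have hmap : mot.toList.map (fun c => if pvIsVow c then 'V' else 'C')
      = t.map (fun x => if x then 'V' else 'C') := by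
    rw [ht, List.map_map]; rfl
  rw [hmap]
  have hg : ∀ x y : Bool, ((if x then 'V' else 'C') == (if y then 'V' else 'C')) = (x == y) := by
    decide
  have hs := pvHas4_map (fun x => if x then 'V' else 'C') hg t
  rw [← Bool.not_or]
  congr 1
  rw [← hs]
  set s := t.map (fun x => if x then 'V' else 'C') with hsdef
  rcases h4 : pvHas4 s with _ | _
  · -- no 4-run: neither pattern is an infix
    rw [Bool.or_eq_false_iff]
    constructor <;>
      · rw [decide_eq_false_iff_not]
        intro hinf
        simp [pvHas4_of_infix _ _ hinf] at h4
  · obtain ⟨x, hx, hinf⟩ := pvHas4_sound s h4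
    have hVC : x = 'V' ∨ x = 'C' := by
      rw [hsdef] at hx
      obtain ⟨y, _, hy⟩ := List.mem_map.mp hx
      cases y
      · right; exact hy.symm
      · left; exact hy.symm
    rcases hVC with rfl | rfl
    · simp [hinf]
    · simp [hinf]

-- ===== VERDICT (by name: the statement is the Claim_ definition above) =====
theorem prononcable_spec : Claim_equal_prononcable := by
  intro mot _
  unfold Spec_prononcable
  rw [prononcable_eq_has4, prononcable_alt_eq_has4]
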